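-- pv_equiv track=rewrite | github.com/williams-brandon-d/TCmodel-delta-Vinnenberg24 | Code/old/neuron_figures_Ih_params.py | findNamesInGroup
-- ===== SOURCE A (Python) =====
-- def findNamesInGroup(names,group):
--     new_names = [] # find cell names in group
--     for iCell in range(len(names)):
--         cell_name = names[iCell]
--         underscore_index = cell_name.find('_')
--         group_name = cell_name[:underscore_index] # remove cell number from name
--         new_names.append(group_name)
--
--     #new_names = [elem[ : -2] for elem in names] # remove last 2 characters
--     indices = [i for i, elem in enumerate(new_names) if group == elem] # compare to group
--     return [names[i] for i in indices]
-- ===== SOURCE B (Python) =====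
-- def findNamesInGroup(names, group):
--     # Build an index: prefix before first '_' -> bucket of names with that prefix,
--     # then answer by one dictionary lookup.
--     buckets = {}
--     for name in names:
--         buckets.setdefault(name[:name.find('_')], []).append(name)
--     return buckets.get(group, [])
-- ===== Notes on version B (the rewrite author's own statement) =====
-- stated objective: alternative
-- what changed: B replaces A's scan-and-compare (prefix list, matching-index list, re-indexing into names) with a hash index: one pass groups the names into buckets keyed by the prefix before the first underscore, and the answer is a single dict lookup of the group key.
import Mathlib
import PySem

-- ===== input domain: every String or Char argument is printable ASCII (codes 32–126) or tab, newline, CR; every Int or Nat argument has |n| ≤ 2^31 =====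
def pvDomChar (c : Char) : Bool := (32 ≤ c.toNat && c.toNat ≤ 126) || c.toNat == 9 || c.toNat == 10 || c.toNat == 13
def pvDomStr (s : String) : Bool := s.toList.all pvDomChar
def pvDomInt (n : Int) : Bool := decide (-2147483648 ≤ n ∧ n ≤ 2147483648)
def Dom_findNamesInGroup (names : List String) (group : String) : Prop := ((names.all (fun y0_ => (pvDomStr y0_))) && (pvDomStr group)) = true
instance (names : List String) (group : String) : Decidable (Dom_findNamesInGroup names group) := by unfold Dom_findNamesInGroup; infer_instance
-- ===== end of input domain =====

-- B replaces A's scan-and-compare with a hash index (prefix -> bucket of names) built in one pass, answered by one lookup; objective: alternative.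

-- ===== PORT A =====
def findNamesInGroup (names : List String) (group : String) : List String :=
  let new_names := names.foldl (fun acc cell_name =>
    let underscore_index := PySem.Str.find cell_name "_"
    let group_name := PySem.Str.slice cell_name none (some underscore_index)
    acc ++ [group_name]) []
  let indices := ((PySem.List.enumerate new_names 0).filter (fun p => group == p.2)).map (fun p => p.1)
  indices.map (fun i => PySem.List.pyGetD names i "")

-- ===== PORT B =====
-- buckets.setdefault(prefix, []).append(name) = Dict.modify prefix [] (· ++ [name]); buckets.get(group, []) = Dict.getD
def findNamesInGroup_alt (names : List String) (group : String) : List String :=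
  let buckets := names.foldl
    (fun d name => d.modify (PySem.Str.slice name none (some (PySem.Str.find name "_"))) [] (· ++ [name]))
    (PySem.Dict.empty : PySem.Dict String (List String))
  buckets.getD group []

-- ===== PRECONDITION & SPEC =====
def Spec_findNamesInGroup (names : List String) (group : String) (out : List String) : Prop := out = findNamesInGroup_alt names group
instance (names : List String) (group : String) (out : List String) : Decidable (Spec_findNamesInGroup names group out) := by unfold Spec_findNamesInGroup; infer_instance

-- ===== CLAIM (what is proved, stated in full; the proofs are below) =====
def Claim_equal_findNamesInGroup : Prop := ∀ (names : List String) (group : String), Dom_findNamesInGroup names group → Spec_findNamesInGroup names group (findNamesInGroup names group)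

-- ===== LEMMAS AND PROOFS =====

-- prefix-before-underscore, shared shape of both ports
def pvPrefix (s : String) : String := PySem.Str.slice s none (some (PySem.Str.find s "_"))

theorem pv_enumerate_shift {α : Type} (xs : List α) (s : Int) :
    PySem.List.enumerate xs (s + 1) = (PySem.List.enumerate xs s).map (fun p => (p.1 + 1, p.2)) := by
  induction xs generalizing s with
  | nil => simp [PySem.List.enumerate_nil]
  | cons a rest ih =>
    simp only [PySem.List.enumerate_cons, List.map_cons]
    rw [show s + 1 + 1 = (s + 1) + 1 by ring, ih (s + 1)]

-- A equals the plain filter of names by prefix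
theorem pv_key (group : String) :
    ∀ (names : List String),
      ((((PySem.List.enumerate (names.map pvPrefix) 0).filter (fun p => group == p.2)).map
          (fun p => p.1)).map (fun i => PySem.List.pyGetD names i "")) =
        names.filter (fun n => pvPrefix n == group) := by
  intro names
  induction names with
  | nil => simp [PySem.List.enumerate_nil]
  | cons a rest ih =>
    simp only [List.map_cons, PySem.List.enumerate_cons]
    rw [show (0 : Int) + 1 = 0 + 1 by ring, pv_enumerate_shift]
    have hmap : ∀ (l : List (Int × String)),
        ((l.map (fun p => ((p.1 : Int) + 1, p.2))).filter (fun p => group == p.2)).map (fun p => p.1)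
          = ((l.filter (fun p => group == p.2)).map (fun p => p.1)).map (fun i => i + 1) := by
      intro l
      rw [List.filter_map, List.map_map, List.map_map]; rfl
    have hshift : (((PySem.List.enumerate (rest.map pvPrefix) 0).filter (fun p => group == p.2)).map
          (fun p => p.1)).map (fun i => PySem.List.pyGetD (a :: rest) (i + 1) "")
        = (((PySem.List.enumerate (rest.map pvPrefix) 0).filter (fun p => group == p.2)).map
          (fun p => p.1)).map (fun i => PySem.List.pyGetD rest i "") := by
      apply List.map_congr_left
      intro i hi
      have hmem : ∃ p ∈ PySem.List.enumerate (rest.map pvPrefix) 0, p.1 = i := by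
        rcases List.mem_map.mp hi with ⟨p, hp, rfl⟩
        exact ⟨p, List.mem_of_mem_filter hp, rfl⟩
      rcases hmem with ⟨p, hp, rfl⟩
      rcases (PySem.List.mem_enumerate_iff _ _ _).mp hp with ⟨k, hk, rfl⟩
      simp only [Int.zero_add]
      rw [show ((k : Int) + 1) = ((k + 1 : Nat) : Int) by push_cast; ring]
      rw [PySem.List.pyGetD_natCast]
      simp [List.getD]
    by_cases h : group = pvPrefix a
    · have hb : (pvPrefix a == group) = true := by simp [h]
      have hb' : (group == pvPrefix a) = true := by simp [h]
      simp only [List.filter_cons, hb, hb', if_pos, List.map_cons]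
      rw [hmap, List.map_map]
      refine congrArg₂ _ ?_ ?_
      · simp [PySem.List.pyGetD_zero_cons]
      · rw [show ((fun i => PySem.List.pyGetD (a :: rest) i "") ∘ fun i => i + 1)
              = (fun i => PySem.List.pyGetD (a :: rest) (i + 1) "") from rfl]
        rw [hshift]; exact ih
    · have hb : (pvPrefix a == group) = false := by simp; exact fun hc => h hc.symm
      have hb' : (group == pvPrefix a) = false := by simp; exact h
      simp only [List.filter_cons, hb, hb', Bool.false_eq_true, if_false]
      rw [hmap, List.map_map]
      rw [show ((fun i => PySem.List.pyGetD (a :: rest) i "") ∘ fun i => i + 1)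
            = (fun i => PySem.List.pyGetD (a :: rest) (i + 1) "") from rfl]
      rw [hshift]; exact ih

theorem pv_foldl_map (names : List String) :
    names.foldl (fun acc cell_name =>
      acc ++ [PySem.Str.slice cell_name none (some (PySem.Str.find cell_name "_"))]) []
      = names.map pvPrefix := by
  have h : ∀ (l : List String) (init : List String),
      l.foldl (fun acc cell_name =>
        acc ++ [PySem.Str.slice cell_name none (some (PySem.Str.find cell_name "_"))]) init
        = init ++ l.map pvPrefix := by
    intro l
    induction l with
    | nil => simp
    | cons a rest ih => intro init; rw [List.foldl_cons, ih]; simp [pvPrefix]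
  simpa using h names []

-- B's bucket lookup equals the plain filter
theorem pv_alt_eq_filter (names : List String) (group : String) :
    findNamesInGroup_alt names group = names.filter (fun n => pvPrefix n == group) := by
  unfold findNamesInGroup_alt
  have hfold : names.foldl
      (fun d name => d.modify (PySem.Str.slice name none (some (PySem.Str.find name "_"))) [] (· ++ [name]))
      (PySem.Dict.empty : PySem.Dict String (List String))
      = (names.map (fun n => (pvPrefix n, n))).foldl
          (fun d p => d.modify p.1 [] (· ++ [p.2])) PySem.Dict.empty := by
    rw [List.foldl_map]; rfl
  rw [hfold, PySem.Dict.getD_foldl_modify_append]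
  rw [List.filter_map, List.map_map]
  simp only [Function.comp_def]
  exact (List.map_id' _).symm ▸ rfl

-- ===== VERDICT (by name: the statement is the Claim_ definition above) =====
theorem findNamesInGroup_spec : Claim_equal_findNamesInGroup := by
  intro names group _
  show findNamesInGroup names group = findNamesInGroup_alt names group
  unfold findNamesInGroup
  simp only []
  rw [pv_foldl_map, pv_key, pv_alt_eq_filter]
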